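-- pv_equiv track=rewrite | github.com/leodurandfr/InboxShield | backend/app/services/brand_detection.py | _domain_is_legitimate
-- ===== SOURCE A (Python) =====
-- def _domain_is_legitimate(
--     actual_domain: str,
--     legitimate_domains: list[str],
-- ) -> bool:
--     """Check if the actual sending domain matches any legitimate domain.
--
--     Handles:
--     - Exact matches: edf.fr == edf.fr
--     - Subdomains: notice.xiaomi.com matches xiaomi.com
--
--     Note: brand+suffix matching (e.g., fnacspectacles.com for "fnac") is NOT
--     done generically because it would also match phishing domains like
--     paypal-verify.xyz. Instead, known brand variants are listed explicitly
--     in BRAND_DATABASE (e.g., fnac → [fnac.com, fnacspectacles.com]).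
--     """
--     for legit in legitimate_domains:
--         if actual_domain == legit:
--             return True
--         # Allow subdomains (e.g., mail.edf.fr matches edf.fr)
--         if actual_domain.endswith("." + legit):
--             return True
--
--     return False
-- ===== SOURCE B (Python) =====
-- def _domain_is_legitimate(
--     actual_domain: str,
--     legitimate_domains: list[str],
-- ) -> bool:
--     """Invert the traversal: enumerate actual_domain's dot-suffixes once and
--     intersect with the set of legitimate domains."""
--     legit = set(legitimate_domains)
--     candidates = {actual_domain}
--     for i, ch in enumerate(actual_domain):
--         if ch == '.':
--             candidates.add(actual_domain[i + 1:])
--     return not candidates.isdisjoint(legit)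
-- ===== Notes on version B (the rewrite author's own statement) =====
-- stated objective: alternative
-- what changed: Instead of scanning each legitimate domain and testing equality/endswith, B builds the set of actual_domain's dot-suffix candidates in one pass over the string and intersects it with the set of legitimate domains.
import Mathlib
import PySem

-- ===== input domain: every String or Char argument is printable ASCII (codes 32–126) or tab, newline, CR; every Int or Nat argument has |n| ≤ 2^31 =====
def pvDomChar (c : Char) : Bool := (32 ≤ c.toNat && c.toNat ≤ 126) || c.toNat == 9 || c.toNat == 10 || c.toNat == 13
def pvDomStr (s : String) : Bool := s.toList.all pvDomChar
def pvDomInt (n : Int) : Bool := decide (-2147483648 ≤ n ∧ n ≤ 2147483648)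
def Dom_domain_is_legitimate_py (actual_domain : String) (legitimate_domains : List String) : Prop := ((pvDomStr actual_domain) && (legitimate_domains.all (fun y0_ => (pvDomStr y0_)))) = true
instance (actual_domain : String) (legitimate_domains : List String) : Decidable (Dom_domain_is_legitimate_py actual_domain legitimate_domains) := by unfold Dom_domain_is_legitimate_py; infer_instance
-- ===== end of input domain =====

-- B replaces A's scan over the legitimate domains (equality / endswith per entry) by one pass
-- over actual_domain collecting its dot-suffix candidates and a set intersection (objective: alternative).

-- ===== PORT A =====
-- the loop 'for legit in legitimate_domains: …'; "." + legit is concatenated on the char-list side (exact)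
def aLoopDIL (actual_domain : String) : List String → Bool
  | [] => false
  | legit :: rest =>
    if actual_domain == legit then true
    else if PySem.Chars.endswith actual_domain.toList ('.' :: legit.toList) then true
    else aLoopDIL actual_domain rest

def domain_is_legitimate_py (actual_domain : String) (legitimate_domains : List String) : Bool :=
  aLoopDIL actual_domain legitimate_domains

-- ===== PORT B =====
def domain_is_legitimate_py_alt (actual_domain : String) (legitimate_domains : List String) : Bool :=
  let legit : PySem.Set String := PySem.Set.ofList legitimate_domains
  let candidates : PySem.Set String :=
    (PySem.List.enumerate actual_domain.toList).foldl
      (fun c p => if p.2 == '.'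
        then PySem.Set.add c (String.ofList (PySem.List.slice actual_domain.toList (some (p.1 + 1)) none))
        else c)
      (PySem.Set.ofList [actual_domain])
  !(PySem.Set.isdisjoint candidates legit)

-- ===== PRECONDITION & SPEC =====
def Spec_domain_is_legitimate_py (actual_domain : String) (legitimate_domains : List String) (out : Bool) : Prop := out = domain_is_legitimate_py_alt actual_domain legitimate_domains
instance (actual_domain : String) (legitimate_domains : List String) (out : Bool) : Decidable (Spec_domain_is_legitimate_py actual_domain legitimate_domains out) := by unfold Spec_domain_is_legitimate_py; infer_instance

-- ===== CLAIM (what is proved, stated in full; the proofs are below) =====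
def Claim_equal_domain_is_legitimate_py : Prop := ∀ (actual_domain : String) (legitimate_domains : List String), Dom_domain_is_legitimate_py actual_domain legitimate_domains → Spec_domain_is_legitimate_py actual_domain legitimate_domains (domain_is_legitimate_py actual_domain legitimate_domains)

-- ===== LEMMAS AND PROOFS =====

-- A's loop returns true iff some legit matches exactly or as a dot-suffix
theorem aLoopDIL_iff (a : String) (ls : List String) :
    aLoopDIL a ls = true ↔
      ∃ l ∈ ls, a = l ∨ ('.' :: l.toList) <:+ a.toList := by
  induction ls with
  | nil => simp [aLoopDIL]
  | cons l rest ih =>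
    by_cases h1 : a = l
    · simp [aLoopDIL, h1]
    · by_cases h2 : PySem.Chars.endswith a.toList ('.' :: l.toList) = true
      · simp only [aLoopDIL, if_pos h2]
        split
        · simp only [true_iff]
          exact ⟨l, List.mem_cons_self .., Or.inl (by exact eq_of_beq ‹(a == l) = true›)⟩
        · simp only [true_iff]
          exact ⟨l, List.mem_cons_self .., Or.inr ((PySem.Chars.endswith_iff _ _).mp h2)⟩
      · have hb : (a == l) = false := by simp [h1]
        simp only [aLoopDIL, hb, Bool.false_eq_true, if_false, h2, ih, List.mem_cons]
        constructor
        · rintro ⟨m, hm, hcase⟩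
          exact ⟨m, Or.inr hm, hcase⟩
        · rintro ⟨m, (rfl | hm), hcase⟩
          · rcases hcase with rfl | hsuf
            · exact absurd rfl h1
            · exact absurd ((PySem.Chars.endswith_iff _ _).mpr hsuf) h2
          · exact ⟨m, hm, hcase⟩

-- a dot-suffix of cs is exactly the tail after some '.' position
theorem dot_suffix_iff (l cs : List Char) :
    ('.' :: l) <:+ cs ↔ ∃ k, ∃ h : k < cs.length, cs[k] = '.' ∧ l = cs.drop (k + 1) := by
  constructor
  · rintro ⟨t, rfl⟩
    exact ⟨t.length, by simp, by simp, by simp [List.drop_append]⟩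
  · rintro ⟨k, h, hdot, rfl⟩
    refine ⟨cs.take k, ?_⟩
    rw [← hdot, List.getElem_cons_drop, List.take_append_drop]

-- membership in the candidate-building foldl
theorem mem_foldl_add {α β : Type} [BEq α] [LawfulBEq α]
    (cond : β → Bool) (f : β → α) (l : List β) (s : PySem.Set α) (x : α) :
    x ∈ l.foldl (fun c p => if cond p then PySem.Set.add c (f p) else c) s ↔
      x ∈ s ∨ ∃ p ∈ l, cond p = true ∧ x = f p := by
  induction l generalizing s with
  | nil => simp
  | cons p rest ih =>
    simp only [List.foldl_cons]
    by_cases hc : cond p = true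
    · simp only [hc, if_true, ih, PySem.Set.mem_add, List.mem_cons]
      constructor
      · rintro ((h | rfl) | ⟨q, hq, hcq, rfl⟩)
        · exact Or.inl h
        · exact Or.inr ⟨p, Or.inl rfl, hc, rfl⟩
        · exact Or.inr ⟨q, Or.inr hq, hcq, rfl⟩
      · rintro (h | ⟨q, (rfl | hq), hcq, rfl⟩)
        · exact Or.inl (Or.inl h)
        · exact Or.inl (Or.inr rfl)
        · exact Or.inr ⟨q, hq, hcq, rfl⟩
    · simp only [hc, if_false, Bool.false_eq_true, ih, List.mem_cons]
      constructor
      · rintro (h | ⟨q, hq, hcq, rfl⟩)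
        · exact Or.inl h
        · exact Or.inr ⟨q, Or.inr hq, hcq, rfl⟩
      · rintro (h | ⟨q, (rfl | hq), hcq, rfl⟩)
        · exact Or.inl h
        · exact absurd hcq hc
        · exact Or.inr ⟨q, hq, hcq, rfl⟩

theorem isdisjoint_false_iff {α : Type} [BEq α] [LawfulBEq α] (s t : PySem.Set α) :
    PySem.Set.isdisjoint s t = false ↔ ∃ x ∈ s, x ∈ t := by
  rw [← Bool.not_eq_true, not_iff_comm, PySem.Set.isdisjoint_iff]
  push Not
  simp

-- membership in B's candidate set: actual_domain itself or the tail after some '.'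
theorem mem_cands (a x : String) :
    x ∈ (PySem.List.enumerate a.toList).foldl
         (fun c p => if p.2 == '.'
            then PySem.Set.add c (String.ofList (PySem.List.slice a.toList (some (p.1 + 1)) none))
            else c)
         (PySem.Set.ofList [a]) ↔
      x = a ∨ ∃ k, ∃ h : k < a.toList.length, a.toList[k] = '.' ∧ x.toList = a.toList.drop (k + 1) := by
  rw [mem_foldl_add (fun p => p.2 == '.')
        (fun p => String.ofList (PySem.List.slice a.toList (some (p.1 + 1)) none))
        (PySem.List.enumerate a.toList) (PySem.Set.ofList [a]) x]
  constructor
  · rintro (hx | ⟨p, hp, hdot, rfl⟩)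
    · left
      simpa [PySem.Set.mem_ofList] using hx
    · right
      rw [PySem.List.mem_enumerate_iff] at hp
      obtain ⟨k, hk, rfl⟩ := hp
      refine ⟨k, hk, by simpa using hdot, ?_⟩
      have hc : (0 : Int) + (k : Int) + 1 = ((k + 1 : Nat) : Int) := by push_cast; ring
      simp only [hc, PySem.List.slice_from_natCast]
      simp
  · rintro (rfl | ⟨k, hk, hdot, hx⟩)
    · left; simp [PySem.Set.mem_ofList]
    · right
      refine ⟨((0 : Int) + k, a.toList[k]), ?_, by simpa using hdot, ?_⟩
      · rw [PySem.List.mem_enumerate_iff]; exact ⟨k, hk, rfl⟩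
      · have hc : (0 : Int) + (k : Int) + 1 = ((k + 1 : Nat) : Int) := by push_cast; ring
        simp only [hc, PySem.List.slice_from_natCast]
        rw [← hx, String.ofList_toList]

-- ===== VERDICT (by name: the statement is the Claim_ definition above) =====
theorem domain_is_legitimate_py_spec : Claim_equal_domain_is_legitimate_py := by
  intro a ls _
  unfold Spec_domain_is_legitimate_py domain_is_legitimate_py domain_is_legitimate_py_alt
  dsimp only
  rw [Bool.eq_iff_iff, aLoopDIL_iff]
  simp only [Bool.not_eq_true']
  rw [isdisjoint_false_iff]
  constructor
  · rintro ⟨l, hl, rfl | hsuf⟩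
    · exact ⟨a, (mem_cands a a).mpr (Or.inl rfl), (PySem.Set.mem_ofList _ _).mpr hl⟩
    · obtain ⟨k, hk, hdot, hdrop⟩ := (dot_suffix_iff l.toList a.toList).mp hsuf
      exact ⟨l, (mem_cands a l).mpr (Or.inr ⟨k, hk, hdot, hdrop⟩), (PySem.Set.mem_ofList _ _).mpr hl⟩
  · rintro ⟨x, hx, hxls⟩
    rw [mem_cands] at hx
    rw [PySem.Set.mem_ofList] at hxls
    rcases hx with rfl | ⟨k, hk, hdot, hdrop⟩
    · exact ⟨x, hxls, Or.inl rfl⟩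
    · exact ⟨x, hxls, Or.inr ((dot_suffix_iff _ _).mpr ⟨k, hk, hdot, hdrop⟩)⟩
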